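-- pv_equiv track=rewrite | github.com/femtomc/smg | src/smg/concepts.py | _resolve_anchors
-- ===== SOURCE A (Python) =====
-- def _matches_prefix(name: str, prefix: str) -> bool:
--     return name == prefix or name.startswith(prefix + ".")
--
-- def _resolve_anchors(package_or_module_names: list[str], prefixes: list[str]) -> list[str]:
--     matches = sorted(
--         {name for prefix in prefixes for name in package_or_module_names if _matches_prefix(name, prefix)},
--         key=lambda name: (name.count("."), name),
--     )
--     anchors: list[str] = []
--     for name in matches:
--         if any(_matches_prefix(name, anchor) for anchor in anchors):
--             continue
--         anchors.append(name)
--     return anchors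
-- ===== SOURCE B (Python) =====
-- def _matches_prefix(name: str, prefix: str) -> bool:
--     return name == prefix or name.startswith(prefix + ".")
--
-- def _resolve_anchors(package_or_module_names: list[str], prefixes: list[str]) -> list[str]:
--     matched = {name for name in package_or_module_names
--                if any(_matches_prefix(name, prefix) for prefix in prefixes)}
--     roots = [name for name in matched
--              if not any(name.startswith(anc + ".") for anc in matched)]
--     return sorted(roots, key=lambda name: (name.count("."), name))
-- ===== Notes on version B (the rewrite author's own statement) =====
-- stated objective: simpler
-- what changed: A sorts the matched set by (depth, name) and greedily accumulates anchors, rescanning the accumulated anchor list for each name; B needs no pre-sort and no accumulator: it filters the matched set by a single global minimality predicate (keep a name iff no other matched name is a proper dotted ancestor of it) and sorts the survivors once at the end.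
import Mathlib
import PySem

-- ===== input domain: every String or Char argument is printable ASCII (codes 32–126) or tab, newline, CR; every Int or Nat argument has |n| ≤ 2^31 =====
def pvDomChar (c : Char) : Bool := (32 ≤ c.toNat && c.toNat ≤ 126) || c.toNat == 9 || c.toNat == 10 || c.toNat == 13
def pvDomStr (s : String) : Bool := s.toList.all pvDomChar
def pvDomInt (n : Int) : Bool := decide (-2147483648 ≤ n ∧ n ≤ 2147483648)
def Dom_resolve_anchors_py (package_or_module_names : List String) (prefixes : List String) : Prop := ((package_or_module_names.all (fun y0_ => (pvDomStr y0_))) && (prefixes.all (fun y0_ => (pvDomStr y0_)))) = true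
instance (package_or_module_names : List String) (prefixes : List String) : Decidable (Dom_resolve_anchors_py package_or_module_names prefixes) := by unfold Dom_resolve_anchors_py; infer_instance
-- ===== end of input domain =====

-- B replaces A's sorted greedy anchor accumulation by a global "has no proper dotted ancestor
-- among the matches" filter followed by one final sort (objective: simpler).

-- ===== PORT A =====
def matches_prefix_py (name : String) (pfx : String) : Bool :=
  name == pfx || PySem.Str.startswith name (pfx ++ ".")

def resolve_anchors_py (package_or_module_names : List String) (prefixes : List String) : List String :=
  let matchesL := PySem.List.sorted2
      (PySem.Set.ofList (prefixes.flatMap (fun pfx =>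
        package_or_module_names.filter (fun name => matches_prefix_py name pfx))))
      (fun name => PySem.Str.count name ".") (fun name => name)
  matchesL.foldl
    (fun anchors name =>
      if anchors.any (fun anchor => matches_prefix_py name anchor) then anchors
      else anchors ++ [name]) []

-- ===== PORT B =====
def matches_prefix_alt (name : String) (pfx : String) : Bool :=
  name == pfx || PySem.Str.startswith name (pfx ++ ".")

def resolve_anchors_py_alt (package_or_module_names : List String) (prefixes : List String) : List String :=
  let matched := PySem.Set.ofList (package_or_module_names.filter
    (fun name => prefixes.any (fun pfx => matches_prefix_alt name pfx)))
  let roots := matched.filter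
    (fun name => !(matched.any (fun anc => PySem.Str.startswith name (anc ++ "."))))
  PySem.List.sorted2 roots (fun name => PySem.Str.count name ".") (fun name => name)

-- ===== PRECONDITION & SPEC =====
def Spec_resolve_anchors_py (package_or_module_names : List String) (prefixes : List String) (out : List String) : Prop := out = resolve_anchors_py_alt package_or_module_names prefixes
instance (package_or_module_names : List String) (prefixes : List String) (out : List String) : Decidable (Spec_resolve_anchors_py package_or_module_names prefixes out) := by unfold Spec_resolve_anchors_py; infer_instance

-- ===== CLAIM (what is proved, stated in full; the proofs are below) =====
def Claim_equal_resolve_anchors_py : Prop := ∀ (package_or_module_names : List String) (prefixes : List String), Dom_resolve_anchors_py package_or_module_names prefixes → Spec_resolve_anchors_py package_or_module_names prefixes (resolve_anchors_py package_or_module_names prefixes)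

-- ===== LEMMAS AND PROOFS =====

-- the sort key both programs use, as a single lexicographic key
def pvKey (n : String) : ℕ ×ₗ String := toLex (PySem.Str.count n ".", n)

-- "a is a proper dotted ancestor of n"
def pvAnc (n a : String) : Prop := (a.toList ++ ['.']) <+: n.toList

theorem startswith_iff_anc (n a : String) :
    PySem.Str.startswith n (a ++ ".") = true ↔ pvAnc n a := by
  rw [PySem.Str.startswith_eq, PySem.Chars.startswith_iff, String.toList_append]
  rfl

theorem count_go_char (c : Char) :
    ∀ (fuel : ℕ) (l : List Char) (acc : ℕ), l.length ≤ fuel →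
      PySem.Chars.count.go [c] fuel l acc = acc + l.count c := by
  intro fuel
  induction fuel with
  | zero => intro l acc h; cases l with
    | nil => simp [PySem.Chars.count.go]
    | cons x t => simp at h
  | succ f ih =>
    intro l acc h
    cases l with
    | nil => simp [PySem.Chars.count.go]
    | cons x t =>
      simp only [PySem.Chars.count.go]
      by_cases hx : x = c
      · subst hx
        simp only [List.isPrefixOf, BEq.rfl, Bool.and_true, if_true]
        rw [List.length_cons] at h
        rw [show List.drop [x].length (x :: t) = t from rfl]
        rw [ih t (acc+1) (by omega)]
        simp
        omega
      · have : [c].isPrefixOf (x :: t) = false := by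
          simp [List.isPrefixOf, Ne.symm hx]
        rw [this]
        simp only [if_false, Bool.false_eq_true]
        rw [List.length_cons] at h
        rw [ih t acc (by omega)]
        simp [hx]

theorem count_chars_char (c : Char) (l : List Char) : PySem.Chars.count l [c] = l.count c := by
  have : ([c] : List Char).isEmpty = false := rfl
  rw [PySem.Chars.count, this]
  simpa using count_go_char c l.length l 0 le_rfl

theorem count_lt_of_anc {n a : String} (h : pvAnc n a) :
    PySem.Str.count a "." < PySem.Str.count n "." := by
  obtain ⟨r, hr⟩ := h
  rw [PySem.Str.count_eq, PySem.Str.count_eq, show (".".toList) = ['.'] from rfl,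
    count_chars_char, count_chars_char, ← hr]
  simp [List.count_append]

theorem anc_trans {n a b : String} (h1 : pvAnc n a) (h2 : pvAnc a b) : pvAnc n b := by
  exact (h2.trans (List.prefix_append _ _)).trans h1

theorem key_lt_of_anc {n a : String} (h : pvAnc n a) : pvKey a < pvKey n := by
  rw [pvKey, pvKey, Prod.Lex.lt_iff]
  simp only [ofLex_toLex]
  exact Or.inl (count_lt_of_anc h)

theorem ne_of_anc {n a : String} (h : pvAnc n a) : a ≠ n := by
  intro e; subst e
  exact absurd (count_lt_of_anc h) (lt_irrefl _)

theorem pvKey_injective : Function.Injective pvKey := by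
  intro a b h
  have := congrArg (fun p => (ofLex p).2) h
  simpa [pvKey] using this

theorem sorted2_eq_sorted_lex (xs : List String) :
    PySem.List.sorted2 xs (fun n => PySem.Str.count n ".") (fun n => n)
      = PySem.List.sorted xs pvKey := by
  have h : (fun (a b : String) =>
      decide (PySem.Str.count a "." < PySem.Str.count b ".") ||
        (!decide (PySem.Str.count b "." < PySem.Str.count a ".") && decide (a < b)))
      = (fun (a b : String) => decide (pvKey a < pvKey b)) := by
    funext a b
    rcases Nat.lt_trichotomy (PySem.Str.count a ".") (PySem.Str.count b ".") with h1 | h1 | h1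
    · have h2 : pvKey a < pvKey b := by
        rw [pvKey, pvKey, Prod.Lex.lt_iff]; simp only [ofLex_toLex]; exact Or.inl h1
      rw [decide_eq_true h1, decide_eq_true h2, Bool.true_or]
    · have h2 : (pvKey a < pvKey b) ↔ a < b := by
        rw [pvKey, pvKey, Prod.Lex.lt_iff]; simp only [ofLex_toLex]
        constructor
        · rintro (hl | ⟨-, hr⟩); · exact absurd hl (by omega)
          · exact hr
        · exact fun hab => Or.inr ⟨h1, hab⟩
      rw [decide_eq_false (by omega : ¬ PySem.Str.count a "." < PySem.Str.count b "."),
        decide_eq_false (by omega : ¬ PySem.Str.count b "." < PySem.Str.count a ".")]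
      by_cases hab : a < b
      · rw [decide_eq_true hab, decide_eq_true (h2.mpr hab)]; simp
      · rw [decide_eq_false hab, decide_eq_false (fun hk => hab (h2.mp hk))]; simp
    · have h2 : ¬ (pvKey a < pvKey b) := by
        rw [pvKey, pvKey, Prod.Lex.lt_iff]; simp only [ofLex_toLex]
        rintro (hl | ⟨he, -⟩) <;> omega
      rw [decide_eq_false (by omega : ¬ PySem.Str.count a "." < PySem.Str.count b "."),
        decide_eq_true h1, decide_eq_false h2]
      simp
  simp only [PySem.List.sorted2, PySem.List.sorted]
  rw [h]
  simp only [if_neg Bool.false_ne_true]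

-- every name with an ancestor among s has a MINIMAL ancestor among s
theorem exists_min_anc (s : List String) :
    ∀ (k : ℕ) (a : String), a ∈ s → PySem.Str.count a "." ≤ k →
      ∃ a0 ∈ s, (a0 = a ∨ pvAnc a a0) ∧ ¬ (∃ b ∈ s, pvAnc a0 b) := by
  intro k
  induction k with
  | zero =>
    intro a ha hk
    refine ⟨a, ha, Or.inl rfl, ?_⟩
    rintro ⟨b, hb, hab⟩
    have := count_lt_of_anc hab
    omega
  | succ k ih =>
    intro a ha hk
    by_cases hex : ∃ b ∈ s, pvAnc a b
    · obtain ⟨b, hb, hab⟩ := hex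
      have hcb := count_lt_of_anc hab
      obtain ⟨a0, ha0, hor, hmin⟩ := ih b hb (by omega)
      refine ⟨a0, ha0, Or.inr ?_, hmin⟩
      rcases hor with rfl | h
      · exact hab
      · exact anc_trans hab h
    · exact ⟨a, ha, Or.inl rfl, hex⟩

-- the greedy fold over a strictly key-sorted list keeps exactly the globally minimal names
theorem greedy_eq_filter (s : List String)
    (hs : s.Pairwise (fun a b => pvKey a < pvKey b)) :
    s.foldl (fun anchors name =>
        if anchors.any (fun anchor => matches_prefix_py name anchor) then anchors
        else anchors ++ [name]) []
      = s.filter (fun m => !(s.any (fun a => PySem.Str.startswith m (a ++ ".")))) := by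
  have hnd : s.Nodup :=
    hs.imp (fun {a b} h e => by subst e; exact absurd h (lt_irrefl _))
  have aux : ∀ (t p : List String), s = p ++ t →
      t.foldl (fun anchors name =>
        if anchors.any (fun anchor => matches_prefix_py name anchor) then anchors
        else anchors ++ [name])
        (p.filter (fun m => !(s.any (fun a => PySem.Str.startswith m (a ++ ".")))))
      = s.filter (fun m => !(s.any (fun a => PySem.Str.startswith m (a ++ "."))))  := by
    intro t
    induction t with
    | nil => intro p hp; rw [hp]; simp
    | cons n t' ih =>
      intro p hp
      have hnp : n ∉ p := by
        have hd := hnd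
        rw [hp] at hd
        intro hmem
        exact List.disjoint_of_nodup_append hd hmem List.mem_cons_self
      have hcond : ((p.filter (fun m => !(s.any (fun a => PySem.Str.startswith m (a ++ "."))))).any
            (fun anchor => matches_prefix_py n anchor))
          = !(!(s.any (fun a => PySem.Str.startswith n (a ++ ".")))) := by
        rw [Bool.not_not, Bool.eq_iff_iff, List.any_eq_true, List.any_eq_true]
        constructor
        · rintro ⟨a, haf, hma⟩
          rcases List.mem_filter.mp haf with ⟨hap, -⟩
          rw [matches_prefix_py] at hma
          rcases Bool.or_eq_true _ _ ▸ hma with he | hsw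
          · exact absurd (beq_iff_eq.mp he ▸ hap) hnp
          · exact ⟨a, by rw [hp]; exact List.mem_append_left _ hap, hsw⟩
        · rintro ⟨a, has, hsw⟩
          have hanc : pvAnc n a := (startswith_iff_anc n a).mp hsw
          obtain ⟨a0, ha0s, hor, hmin⟩ := exists_min_anc s (PySem.Str.count a ".") a has le_rfl
          have hanc0 : pvAnc n a0 := by
            rcases hor with rfl | h
            · exact hanc
            · exact anc_trans hanc h
          have hp0 : a0 ∈ p := by
            have hmem := ha0s
            rw [hp] at hmem
            rcases List.mem_append.mp hmem with h | h
            · exact h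
            · rcases List.mem_cons.mp h with rfl | h
              · exact absurd rfl (ne_of_anc hanc0)
              · exfalso
                rcases List.pairwise_append.mp (hp ▸ hs) with ⟨-, h2, -⟩
                have hlt := (List.pairwise_cons.mp h2).1 a0 h
                exact absurd (key_lt_of_anc hanc0) (lt_asymm hlt)
          have hpm0 : (!(s.any (fun a => PySem.Str.startswith a0 (a ++ ".")))) = true := by
            rw [Bool.not_eq_eq_eq_not, Bool.not_true, List.any_eq_false]
            intro b hb hswb
            exact hmin ⟨b, hb, (startswith_iff_anc a0 b).mp hswb⟩
          refine ⟨a0, List.mem_filter.mpr ⟨hp0, hpm0⟩, ?_⟩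
          rw [matches_prefix_py]
          rw [Bool.or_eq_true _ _]
          exact Or.inr ((startswith_iff_anc n a0).mpr hanc0)
      have hstep : (if ((p.filter (fun m => !(s.any (fun a => PySem.Str.startswith m (a ++ "."))))).any
              (fun anchor => matches_prefix_py n anchor)) = true
            then p.filter (fun m => !(s.any (fun a => PySem.Str.startswith m (a ++ ".")))) 
            else p.filter (fun m => !(s.any (fun a => PySem.Str.startswith m (a ++ ".")))) ++ [n])
          = (p ++ [n]).filter (fun m => !(s.any (fun a => PySem.Str.startswith m (a ++ ".")))) := by
        rw [hcond, List.filter_append]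
        cases hpm : (!(s.any (fun a => PySem.Str.startswith n (a ++ ".")))) with
        | false => simp only [List.filter_cons, List.filter_nil, hpm]; simp
        | true => simp only [List.filter_cons, List.filter_nil, hpm]; simp
      rw [List.foldl_cons, hstep, ih (p ++ [n]) (by rw [hp]; simp)]
  have := aux s [] rfl
  simpa using this

-- the whole pipeline, abstracted over the two (equal-as-sets) matched lists
theorem final_core (MA MB : List String) (hA : MA.Nodup) (hB : MB.Nodup)
    (hmem : ∀ x, x ∈ MA ↔ x ∈ MB) :
    (PySem.List.sorted MA pvKey).foldl (fun anchors name =>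
        if anchors.any (fun anchor => matches_prefix_py name anchor) then anchors
        else anchors ++ [name]) []
      = PySem.List.sorted
          (MB.filter (fun m => !(MB.any (fun anc => PySem.Str.startswith m (anc ++ "."))))) pvKey := by
  have hperm : MA.Perm MB := (List.perm_ext_iff_of_nodup hA hB).mpr hmem
  have hsp : (PySem.List.sorted MA pvKey).Perm MA := PySem.List.sorted_perm MA pvKey false
  have hndA : (PySem.List.sorted MA pvKey).Nodup := (List.Perm.nodup_iff hsp).mpr hA
  have hlt : (PySem.List.sorted MA pvKey).Pairwise (fun a b => pvKey a < pvKey b) := by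
    have hle := PySem.List.sorted_pairwise MA pvKey
    exact (hle.and hndA).imp
      (fun {a b} h => lt_of_le_of_ne h.1 (fun e => h.2 (pvKey_injective e)))
  rw [greedy_eq_filter _ hlt]
  have hsAB : (PySem.List.sorted MA pvKey).Perm MB := hsp.trans hperm
  have hpred : (fun m => !((PySem.List.sorted MA pvKey).any (fun a => PySem.Str.startswith m (a ++ "."))))
      = (fun m => !(MB.any (fun anc => PySem.Str.startswith m (anc ++ ".")))) :=
    funext fun m => by rw [hsAB.any_eq]
  rw [hpred]
  refine (PySem.List.sorted_eq_of_perm_of_pairwise_lt _ _ _ (hsAB.filter _) ?_).symm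
  exact List.Pairwise.sublist (List.filter_sublist) hlt

-- ===== VERDICT (by name: the statement is the Claim_ definition above) =====
theorem resolve_anchors_py_spec : Claim_equal_resolve_anchors_py := by
  intro names prefixes _
  unfold Spec_resolve_anchors_py
  simp only [resolve_anchors_py, resolve_anchors_py_alt, sorted2_eq_sorted_lex]
  apply final_core
  · exact PySem.Set.nodup_ofList _
  · exact PySem.Set.nodup_ofList _
  · intro x
    rw [PySem.Set.mem_ofList, PySem.Set.mem_ofList, List.mem_flatMap, List.mem_filter,
      List.any_eq_true]
    simp only [matches_prefix_alt, matches_prefix_py, List.mem_filter]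
    constructor
    · rintro ⟨p, hp, hxn, hm⟩
      exact ⟨hxn, p, hp, hm⟩
    · rintro ⟨hxn, p, hp, hm⟩
      exact ⟨p, hp, hxn, hm⟩
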